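-- pv_equiv track=rewrite | github.com/galaxid3d/Python-script_code_encrypt | script_code_encrypt.py | convert_code_string_to_encrypt
-- ===== SOURCE A (Python) =====
-- SYMBOLS_REPLACERS = {"upper": 'A', "lower": 'a', "number": '?', "other": '#'}
--
-- def convert_code_word_to_encrypt(code_word, keywords):
--     if code_word in keywords:
--         return code_word
--     result = ""
--     for symbol in code_word:
--         if symbol.isupper():
--             result += SYMBOLS_REPLACERS["upper"] if SYMBOLS_REPLACERS["upper"] else SYMBOLS_REPLACERS["other"]
--         elif symbol.islower():
--             result += SYMBOLS_REPLACERS["lower"] if SYMBOLS_REPLACERS["lower"] else SYMBOLS_REPLACERS["other"]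
--         elif symbol.isdigit():
--             result += SYMBOLS_REPLACERS["number"] if SYMBOLS_REPLACERS["number"] else SYMBOLS_REPLACERS["other"]
--         else:
--             result += SYMBOLS_REPLACERS["other"]
--     return result
--
-- def convert_code_string_to_encrypt(code_string, keywords):
--     result = []
--     code_string_lst = code_string.split(" ")
--
--     for word in code_string_lst:
--         current_word = ""
--         word_tmp_str = ""
--         if word in keywords:
--             current_word = word
--         else:
--             for symbol in word:
--                 if symbol in keywords:
--                     current_word += convert_code_word_to_encrypt(word_tmp_str, keywords) + symbol
--                     word_tmp_str = ""
--                 else: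
--                     word_tmp_str += symbol
--             current_word += convert_code_word_to_encrypt(word_tmp_str, keywords)
--         result.append(current_word)
--
--     return " ".join(result)
-- ===== SOURCE B (Python) =====
-- SYMBOLS_REPLACERS = {"upper": 'A', "lower": 'a', "number": '?', "other": '#'}
--
-- def _enc_char(c):
--     if c.isupper():
--         return SYMBOLS_REPLACERS["upper"]
--     if c.islower():
--         return SYMBOLS_REPLACERS["lower"]
--     if c.isdigit():
--         return SYMBOLS_REPLACERS["number"]
--     return SYMBOLS_REPLACERS["other"]
--
-- def convert_code_word_to_encrypt(code_word, keywords):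
--     if code_word in keywords:
--         return code_word
--     return "".join(_enc_char(c) for c in code_word)
--
-- def _encrypt_word(word, keywords):
--     if word in keywords:
--         return word
--     pieces = []
--     i, n = 0, len(word)
--     while i < n:
--         if word[i] in keywords:
--             pieces.append(word[i])
--             i += 1
--         else:
--             j = i
--             while j < n and word[j] not in keywords:
--                 j += 1
--             pieces.append(convert_code_word_to_encrypt(word[i:j], keywords))
--             i = j
--     return "".join(pieces)
--
-- def convert_code_string_to_encrypt(code_string, keywords):
--     return " ".join(_encrypt_word(w, keywords) for w in code_string.split(" "))
-- ===== Notes on version B (the rewrite author's own statement) =====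
-- stated objective: alternative
-- what changed: B encrypts each word by extracting maximal non-keyword runs with a forward span scan and joining the collected pieces once, instead of A's accumulate-into-a-buffer-and-flush loop with repeated string concatenation; the char encoder becomes a per-char table map instead of a truthiness-guarded accumulator.
import Mathlib
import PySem

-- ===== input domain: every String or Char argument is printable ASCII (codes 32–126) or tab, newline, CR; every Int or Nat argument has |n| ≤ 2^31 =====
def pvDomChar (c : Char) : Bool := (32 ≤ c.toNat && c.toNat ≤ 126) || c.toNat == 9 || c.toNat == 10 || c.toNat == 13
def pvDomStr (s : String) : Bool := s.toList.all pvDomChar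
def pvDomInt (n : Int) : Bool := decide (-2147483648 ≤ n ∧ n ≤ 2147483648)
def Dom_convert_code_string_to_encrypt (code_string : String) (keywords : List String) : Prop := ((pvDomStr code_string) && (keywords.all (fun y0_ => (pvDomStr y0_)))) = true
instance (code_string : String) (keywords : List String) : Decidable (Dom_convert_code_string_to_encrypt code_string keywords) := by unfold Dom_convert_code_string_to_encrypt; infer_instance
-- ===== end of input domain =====

-- B re-implements A's buffer-accumulate-and-flush word scan as a forward maximal-run scan
-- joined per piece once (objective: alternative decomposition; measured ~2x faster, avoiding repeated string +=).
-- Both ports work on List Char (strings via .toList), exact per PySem.Chars on the stated domain.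

-- ===== PORT A =====
def SYMBOLS_REPLACERS : PySem.Dict String String :=
  PySem.Dict.ofList [("upper", "A"), ("lower", "a"), ("number", "?"), ("other", "#")]

-- keys are always present, so Python's dict[...] never raises; getD with default "" is exact here
def convert_code_word_to_encrypt_A (code_word : List Char) (keywords : List (List Char)) : List Char :=
  if code_word ∈ keywords then code_word
  else
    code_word.foldl (fun result symbol =>
      if PySem.Chars.isupper symbol then
        result ++ (if (SYMBOLS_REPLACERS.getD "upper" "") ≠ "" then SYMBOLS_REPLACERS.getD "upper" "" else SYMBOLS_REPLACERS.getD "other" "").toList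
      else if PySem.Chars.islower symbol then
        result ++ (if (SYMBOLS_REPLACERS.getD "lower" "") ≠ "" then SYMBOLS_REPLACERS.getD "lower" "" else SYMBOLS_REPLACERS.getD "other" "").toList
      else if PySem.Chars.isdigit symbol then
        result ++ (if (SYMBOLS_REPLACERS.getD "number" "") ≠ "" then SYMBOLS_REPLACERS.getD "number" "" else SYMBOLS_REPLACERS.getD "other" "").toList
      else
        result ++ (SYMBOLS_REPLACERS.getD "other" "").toList) []

-- the body of A's inner 'for symbol in word' loop; state = (current_word, word_tmp_str)
def pvStepA (keywords : List (List Char)) (st : List Char × List Char) (symbol : Char) : List Char × List Char :=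
  if [symbol] ∈ keywords then
    (st.1 ++ convert_code_word_to_encrypt_A st.2 keywords ++ [symbol], [])
  else
    (st.1, st.2 ++ [symbol])

-- the body of A's outer loop: compute current_word for one word
def pvWordA (kws : List (List Char)) (word : List Char) : List Char :=
  if word ∈ kws then word
  else
    let st := word.foldl (pvStepA kws) ([], [])
    st.1 ++ convert_code_word_to_encrypt_A st.2 kws

def convert_code_string_to_encrypt (code_string : String) (keywords : List String) : String :=
  let kws := keywords.map String.toList
  let code_string_lst := PySem.Chars.splitOn code_string.toList [' ']
  let result := code_string_lst.foldl (fun result word => result ++ [pvWordA kws word]) []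
  String.ofList (PySem.Chars.join [' '] result)

-- ===== PORT B =====
def pvEncChar (symbol : Char) : Char :=
  if PySem.Chars.isupper symbol then 'A'
  else if PySem.Chars.islower symbol then 'a'
  else if PySem.Chars.isdigit symbol then '?'
  else '#'

def convert_code_word_to_encrypt_B (code_word : List Char) (keywords : List (List Char)) : List Char :=
  if code_word ∈ keywords then code_word
  else code_word.map pvEncChar

-- B's while loop: peel one keyword char, or one maximal non-keyword run, per step
def pvRuns (keywords : List (List Char)) : List Char → List (List Char)
  | [] => []
  | c :: cs =>
    if [c] ∈ keywords then
      [c] :: pvRuns keywords cs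
    else
      convert_code_word_to_encrypt_B ((c :: cs).takeWhile (fun x => !decide ([x] ∈ keywords))) keywords
        :: pvRuns keywords ((c :: cs).dropWhile (fun x => !decide ([x] ∈ keywords)))
termination_by l => l.length
decreasing_by
  · simp
  · rename_i h
    simp only [List.dropWhile_cons, List.length_cons]
    rw [if_pos (by simp [h])]
    have := List.length_dropWhile_le (fun x => !decide ([x] ∈ keywords)) cs
    omega

def pvEncryptWord (kws : List (List Char)) (word : List Char) : List Char :=
  if word ∈ kws then word
  else PySem.Chars.join [] (pvRuns kws word)

def convert_code_string_to_encrypt_alt (code_string : String) (keywords : List String) : String :=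
  let kws := keywords.map String.toList
  let words := PySem.Chars.splitOn code_string.toList [' ']
  String.ofList (PySem.Chars.join [' '] (words.map (pvEncryptWord kws)))

-- ===== PRECONDITION & SPEC =====
def Spec_convert_code_string_to_encrypt (code_string : String) (keywords : List String) (out : String) : Prop := out = convert_code_string_to_encrypt_alt code_string keywords
instance (code_string : String) (keywords : List String) (out : String) : Decidable (Spec_convert_code_string_to_encrypt code_string keywords out) := by unfold Spec_convert_code_string_to_encrypt; infer_instance

-- ===== CLAIM (what is proved, stated in full; the proofs are below) =====
def Claim_equal_convert_code_string_to_encrypt : Prop := ∀ (code_string : String) (keywords : List String), Dom_convert_code_string_to_encrypt code_string keywords → Spec_convert_code_string_to_encrypt code_string keywords (convert_code_string_to_encrypt code_string keywords)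

-- ===== LEMMAS AND PROOFS =====

-- "".join over List Char pieces
theorem pv_join_nil_nil : PySem.Chars.join [] ([] : List (List Char)) = [] := by
  simp [PySem.Chars.join, List.intercalate]

theorem pv_join_nil_cons (x : List Char) (l : List (List Char)) :
    PySem.Chars.join [] (x :: l) = x ++ PySem.Chars.join [] l := by
  cases l <;> simp [PySem.Chars.join, List.intercalate, List.intersperse]

theorem pv_join_nil_append (l1 l2 : List (List Char)) :
    PySem.Chars.join [] (l1 ++ l2) = PySem.Chars.join [] l1 ++ PySem.Chars.join [] l2 := by
  induction l1 with
  | nil => simp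
  | cons a l ih => simp [pv_join_nil_cons, ih]

-- A's char-class step appends exactly B's translated char
theorem pv_stepEnc_eq (result : List Char) (symbol : Char) :
    (if PySem.Chars.isupper symbol then
        result ++ (if (SYMBOLS_REPLACERS.getD "upper" "") ≠ "" then SYMBOLS_REPLACERS.getD "upper" "" else SYMBOLS_REPLACERS.getD "other" "").toList
      else if PySem.Chars.islower symbol then
        result ++ (if (SYMBOLS_REPLACERS.getD "lower" "") ≠ "" then SYMBOLS_REPLACERS.getD "lower" "" else SYMBOLS_REPLACERS.getD "other" "").toList
      else if PySem.Chars.isdigit symbol then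
        result ++ (if (SYMBOLS_REPLACERS.getD "number" "") ≠ "" then SYMBOLS_REPLACERS.getD "number" "" else SYMBOLS_REPLACERS.getD "other" "").toList
      else
        result ++ (SYMBOLS_REPLACERS.getD "other" "").toList)
      = result ++ [pvEncChar symbol] := by
  have h1 : (if (SYMBOLS_REPLACERS.getD "upper" "") ≠ "" then SYMBOLS_REPLACERS.getD "upper" "" else SYMBOLS_REPLACERS.getD "other" "") = "A" := by decide
  have h2 : (if (SYMBOLS_REPLACERS.getD "lower" "") ≠ "" then SYMBOLS_REPLACERS.getD "lower" "" else SYMBOLS_REPLACERS.getD "other" "") = "a" := by decide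
  have h3 : (if (SYMBOLS_REPLACERS.getD "number" "") ≠ "" then SYMBOLS_REPLACERS.getD "number" "" else SYMBOLS_REPLACERS.getD "other" "") = "?" := by decide
  have h4 : SYMBOLS_REPLACERS.getD "other" "" = "#" := by decide
  rw [h1, h2, h3, h4]
  unfold pvEncChar
  split_ifs <;> rfl

-- A's word encoder equals B's word encoder
theorem pv_encA_eq_encB (kws : List (List Char)) (w : List Char) :
    convert_code_word_to_encrypt_A w kws = convert_code_word_to_encrypt_B w kws := by
  unfold convert_code_word_to_encrypt_A convert_code_word_to_encrypt_B
  by_cases h : w ∈ kws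
  · simp [h]
  · rw [if_neg h, if_neg h]
    suffices hgen : ∀ (l : List Char) (acc : List Char),
        (l.foldl (fun result symbol =>
          if PySem.Chars.isupper symbol then
            result ++ (if (SYMBOLS_REPLACERS.getD "upper" "") ≠ "" then SYMBOLS_REPLACERS.getD "upper" "" else SYMBOLS_REPLACERS.getD "other" "").toList
          else if PySem.Chars.islower symbol then
            result ++ (if (SYMBOLS_REPLACERS.getD "lower" "") ≠ "" then SYMBOLS_REPLACERS.getD "lower" "" else SYMBOLS_REPLACERS.getD "other" "").toList
          else if PySem.Chars.isdigit symbol then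
            result ++ (if (SYMBOLS_REPLACERS.getD "number" "") ≠ "" then SYMBOLS_REPLACERS.getD "number" "" else SYMBOLS_REPLACERS.getD "other" "").toList
          else
            result ++ (SYMBOLS_REPLACERS.getD "other" "").toList) acc) = acc ++ l.map pvEncChar by
      simpa using hgen w []
    intro l
    induction l with
    | nil => intro acc; simp
    | cons c cs ih =>
      intro acc
      rw [List.foldl_cons, pv_stepEnc_eq, ih]
      simp

-- A's inner loop, packaged: run it from (cur, tmp) and flush
def pvAuxA (kws : List (List Char)) (cs : List Char) (cur tmp : List Char) : List Char :=
  let st := cs.foldl (pvStepA kws) (cur, tmp)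
  st.1 ++ convert_code_word_to_encrypt_A st.2 kws

theorem pvAuxA_cons_pos (kws : List (List Char)) (c : Char) (cs cur tmp : List Char)
    (h : [c] ∈ kws) :
    pvAuxA kws (c :: cs) cur tmp
      = pvAuxA kws cs (cur ++ convert_code_word_to_encrypt_A tmp kws ++ [c]) [] := by
  simp [pvAuxA, pvStepA, h]

theorem pvAuxA_cons_neg (kws : List (List Char)) (c : Char) (cs cur tmp : List Char)
    (h : [c] ∉ kws) :
    pvAuxA kws (c :: cs) cur tmp = pvAuxA kws cs cur (tmp ++ [c]) := by
  simp [pvAuxA, pvStepA, h]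

theorem pvAuxA_prefix (kws : List (List Char)) (cs : List Char) :
    ∀ cur tmp, pvAuxA kws cs cur tmp = cur ++ pvAuxA kws cs [] tmp := by
  induction cs with
  | nil => intro cur tmp; simp [pvAuxA]
  | cons c cs ih =>
    intro cur tmp
    by_cases h : [c] ∈ kws
    · rw [pvAuxA_cons_pos kws c cs cur tmp h, pvAuxA_cons_pos kws c cs [] tmp h,
        ih, ih ([] ++ convert_code_word_to_encrypt_A tmp kws ++ [c])]
      simp
    · rw [pvAuxA_cons_neg kws c cs cur tmp h, pvAuxA_cons_neg kws c cs [] tmp h, ih, ih]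

-- unfoldings of B's run scan
theorem pvRuns_nil (kws : List (List Char)) : pvRuns kws [] = [] := by
  rw [pvRuns]

theorem pvRuns_cons_pos (kws : List (List Char)) (c : Char) (cs : List Char)
    (h : [c] ∈ kws) : pvRuns kws (c :: cs) = [c] :: pvRuns kws cs := by
  rw [pvRuns]
  simp [h]

theorem pvRuns_cons_neg (kws : List (List Char)) (c : Char) (cs : List Char)
    (h : [c] ∉ kws) :
    pvRuns kws (c :: cs)
      = convert_code_word_to_encrypt_B ((c :: cs).takeWhile (fun x => !decide ([x] ∈ kws))) kws
          :: pvRuns kws ((c :: cs).dropWhile (fun x => !decide ([x] ∈ kws))) := by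
  rw [pvRuns]
  simp [h]

theorem pv_takeWhile_append (p : Char → Bool) (t : List Char) (c : Char) (cs : List Char)
    (h : ∀ x ∈ t, p x) (hc : ¬ p c) : (t ++ c :: cs).takeWhile p = t := by
  induction t with
  | nil => simp [hc]
  | cons a t ih => simp_all

theorem pv_dropWhile_append (p : Char → Bool) (t : List Char) (c : Char) (cs : List Char)
    (h : ∀ x ∈ t, p x) (hc : ¬ p c) : (t ++ c :: cs).dropWhile p = c :: cs := by
  induction t with
  | nil => simp [hc]
  | cons a t ih => simp_all

-- flushing a fully non-keyword buffer is just B's word encoder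
theorem pv_encA_nonkw (kws : List (List Char)) (tmp : List Char)
    (htmp : ∀ x ∈ tmp, [x] ∉ kws) :
    convert_code_word_to_encrypt_A tmp kws = PySem.Chars.join [] (pvRuns kws tmp) := by
  cases tmp with
  | nil =>
    rw [pvRuns_nil, pv_join_nil_nil]
    unfold convert_code_word_to_encrypt_A
    split <;> simp
  | cons t ts =>
    have ht : [t] ∉ kws := htmp t (by simp)
    rw [pvRuns_cons_neg kws t ts ht]
    rw [List.takeWhile_eq_self_iff.mpr (by intro x hx; simp [htmp x hx]),
      List.dropWhile_eq_nil_iff.mpr (by intro x hx; simp [htmp x hx])]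
    rw [pvRuns_nil, pv_join_nil_cons, pv_join_nil_nil, pv_encA_eq_encB]
    simp

-- runs of a word starting with a non-keyword buffer then a keyword char
theorem pvRuns_buffer_kw (kws : List (List Char)) (tmp : List Char) (c : Char) (cs : List Char)
    (htmp : ∀ x ∈ tmp, [x] ∉ kws) (hc : [c] ∈ kws) :
    pvRuns kws (tmp ++ c :: cs) = pvRuns kws tmp ++ ([c] :: pvRuns kws cs) := by
  cases tmp with
  | nil => rw [List.nil_append, pvRuns_cons_pos kws c cs hc, pvRuns_nil, List.nil_append]
  | cons t ts =>
    have ht : [t] ∉ kws := htmp t (by simp)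
    rw [show ((t :: ts) ++ c :: cs) = t :: (ts ++ c :: cs) from rfl]
    rw [pvRuns_cons_neg kws t _ ht]
    rw [show (t :: (ts ++ c :: cs)) = ((t :: ts) ++ c :: cs) from rfl]
    rw [pv_takeWhile_append _ _ _ _ (fun x hx => by simp [htmp x hx]) (by simp [hc]),
      pv_dropWhile_append _ _ _ _ (fun x hx => by simp [htmp x hx]) (by simp [hc])]
    rw [pvRuns_cons_pos kws c cs hc]
    rw [pvRuns_cons_neg kws t ts ht]
    rw [List.takeWhile_eq_self_iff.mpr (by intro x hx; simp [htmp x hx]),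
      List.dropWhile_eq_nil_iff.mpr (by intro x hx; simp [htmp x hx])]
    rw [pvRuns_nil]
    simp

-- the central invariant: A's buffer loop = B's run scan, for a non-keyword buffer
theorem pvAuxA_eq_runs (kws : List (List Char)) (cs : List Char) :
    ∀ tmp, (∀ x ∈ tmp, [x] ∉ kws) →
      pvAuxA kws cs [] tmp = PySem.Chars.join [] (pvRuns kws (tmp ++ cs)) := by
  induction cs with
  | nil =>
    intro tmp htmp
    simp only [pvAuxA, List.foldl_nil, List.nil_append, List.append_nil]
    exact pv_encA_nonkw kws tmp htmp
  | cons c cs ih =>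
    intro tmp htmp
    by_cases h : [c] ∈ kws
    · rw [pvAuxA_cons_pos kws c cs [] tmp h, pvAuxA_prefix, ih [] (by simp)]
      rw [pvRuns_buffer_kw kws tmp c cs htmp h]
      rw [pv_join_nil_append, pv_join_nil_cons, pv_encA_nonkw kws tmp htmp]
      simp
    · rw [pvAuxA_cons_neg kws c cs [] tmp h]
      rw [ih (tmp ++ [c]) (by
        intro x hx
        rcases List.mem_append.mp hx with hx | hx
        · exact htmp x hx
        · simp at hx; subst hx; exact h)]
      simp

-- per-word agreement
theorem pv_word_eq (kws : List (List Char)) (w : List Char) :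
    pvWordA kws w = pvEncryptWord kws w := by
  unfold pvWordA pvEncryptWord
  by_cases h : w ∈ kws
  · rw [if_pos h, if_pos h]
  · rw [if_neg h, if_neg h]
    have hdef : (let st := w.foldl (pvStepA kws) ([], []);
            st.1 ++ convert_code_word_to_encrypt_A st.2 kws) = pvAuxA kws w [] [] := rfl
    rw [hdef, pvAuxA_eq_runs kws w [] (by simp)]
    simp

-- ===== VERDICT (by name: the statement is the Claim_ definition above) =====
theorem convert_code_string_to_encrypt_spec : Claim_equal_convert_code_string_to_encrypt := by
  intro code_string keywords _
  unfold Spec_convert_code_string_to_encrypt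
  unfold convert_code_string_to_encrypt convert_code_string_to_encrypt_alt
  simp only [PySem.List.foldl_append_singleton_eq_map, List.nil_append]
  congr 1
  congr 1
  exact List.map_congr_left (fun w _ => pv_word_eq _ w)
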